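-- pv_equiv track=rewrite | github.com/stroland02/Wavy-Labs-Code-Base- | wavy-ai/utils/music_theory.py | snap_to_scale
-- ===== SOURCE A (Python) =====
-- _SEMITONE_MAP = {
--     "C": 0, "C#": 1, "Db": 1, "D": 2, "D#": 3, "Eb": 3,
--     "E": 4, "F": 5, "F#": 6, "Gb": 6, "G": 7, "G#": 8,
--     "Ab": 8, "A": 9, "A#": 10, "Bb": 10, "B": 11,
-- }
--
-- _SCALE_INTERVALS = {
--     "major":         [0, 2, 4, 5, 7, 9, 11],
--     "minor":         [0, 2, 3, 5, 7, 8, 10],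
--     "dorian":        [0, 2, 3, 5, 7, 9, 10],
--     "phrygian":      [0, 1, 3, 5, 7, 8, 10],
--     "mixolydian":    [0, 2, 4, 5, 7, 9, 10],
--     "pentatonic":    [0, 2, 4, 7, 9],
--     "minor_pent":    [0, 3, 5, 7, 10],
--     "blues":         [0, 3, 5, 6, 7, 10],
--     "harmonic_minor":[0, 2, 3, 5, 7, 8, 11],
-- }
--
-- def snap_to_scale(pitch: int, key: str, scale_type: str) -> int:
--     """Snap a MIDI pitch to the nearest note in the given scale.
--     Preserves octave as much as possible (only adjusts pitch class)."""
--     intervals = _SCALE_INTERVALS.get(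
--         scale_type.lower().replace(" ", "_"), _SCALE_INTERVALS["major"]
--     )
--     root_pc = _SEMITONE_MAP.get(key, 0)
--     # Build set of valid pitch classes
--     valid_pcs = {(root_pc + iv) % 12 for iv in intervals}
--     if pitch % 12 in valid_pcs:
--         return pitch
--     # Try ±1, ±2 semitones (closest wins)
--     for delta in (1, -1, 2, -2, 3, -3, 4, -4, 5, -5, 6):
--         candidate = pitch + delta
--         if candidate % 12 in valid_pcs:
--             return max(0, min(127, candidate))
--     return pitch  # Shouldn't happen
-- ===== SOURCE B (Python) =====
-- _SEMITONE_MAP = {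
--     "C": 0, "C#": 1, "Db": 1, "D": 2, "D#": 3, "Eb": 3,
--     "E": 4, "F": 5, "F#": 6, "Gb": 6, "G": 7, "G#": 8,
--     "Ab": 8, "A": 9, "A#": 10, "Bb": 10, "B": 11,
-- }
--
-- _SCALE_INTERVALS = {
--     "major":         [0, 2, 4, 5, 7, 9, 11],
--     "minor":         [0, 2, 3, 5, 7, 8, 10],
--     "dorian":        [0, 2, 3, 5, 7, 9, 10],
--     "phrygian":      [0, 1, 3, 5, 7, 8, 10],
--     "mixolydian":    [0, 2, 4, 5, 7, 9, 10],
--     "pentatonic":    [0, 2, 4, 7, 9],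
--     "minor_pent":    [0, 3, 5, 7, 10],
--     "blues":         [0, 3, 5, 6, 7, 10],
--     "harmonic_minor":[0, 2, 3, 5, 7, 8, 11],
-- }
--
-- def snap_to_scale(pitch: int, key: str, scale_type: str) -> int:
--     """Snap a MIDI pitch to the nearest note in the given scale.
--
--     Represents the scale as a 12-bit pitch-class mask and walks upward and
--     downward from the pitch class to the nearest set bit; on a tie the upward
--     (positive) step wins."""
--     intervals = _SCALE_INTERVALS.get(
--         scale_type.lower().replace(" ", "_"), _SCALE_INTERVALS["major"]
--     )
--     root = _SEMITONE_MAP.get(key, 0)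
--     mask = 0
--     for iv in intervals:
--         mask |= 1 << ((root + iv) % 12)
--     p = pitch % 12
--     if (mask >> p) & 1:
--         return pitch
--     up = 1
--     while not (mask >> ((p + up) % 12)) & 1:
--         up += 1
--     down = 1
--     while not (mask >> ((p - down) % 12)) & 1:
--         down += 1
--     delta = up if up <= down else -down
--     return max(0, min(127, pitch + delta))
-- ===== Notes on version B (the rewrite author's own statement) =====
-- stated objective: alternative
-- what changed: Replaces A's fixed probe sequence (+1,-1,+2,...,+6) over a set of pitch classes with a 12-bit pitch-class bitmask and two directional walks (nearest set bit upward and downward), taking the upward step on ties.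
import Mathlib
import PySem

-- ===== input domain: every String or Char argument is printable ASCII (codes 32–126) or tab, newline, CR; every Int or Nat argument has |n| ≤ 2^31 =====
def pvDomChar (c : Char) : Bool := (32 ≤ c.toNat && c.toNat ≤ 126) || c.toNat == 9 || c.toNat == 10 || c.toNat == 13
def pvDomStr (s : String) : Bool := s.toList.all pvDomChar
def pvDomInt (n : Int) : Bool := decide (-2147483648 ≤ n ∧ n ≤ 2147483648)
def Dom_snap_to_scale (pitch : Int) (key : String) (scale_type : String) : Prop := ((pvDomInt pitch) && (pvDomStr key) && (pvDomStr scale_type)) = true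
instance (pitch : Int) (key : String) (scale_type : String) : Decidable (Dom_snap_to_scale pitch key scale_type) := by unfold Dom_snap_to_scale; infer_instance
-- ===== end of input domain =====

-- B replaces A's fixed probe order (+1,-1,+2,…,+6) by a 12-bit pitch-class bitmask and two
-- directional nearest-set-bit walks, preferring the upward step on ties (alternative, same cost class).

-- shared module constants (both Pythons carry the identical dict literals)
def pvSemitoneMap : PySem.Dict String Int := PySem.Dict.ofList
  [("C",0),("C#",1),("Db",1),("D",2),("D#",3),("Eb",3),("E",4),("F",5),("F#",6),("Gb",6),
   ("G",7),("G#",8),("Ab",8),("A",9),("A#",10),("Bb",10),("B",11)]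

def pvScaleIntervals : PySem.Dict String (List Int) := PySem.Dict.ofList
  [("major",[0,2,4,5,7,9,11]),("minor",[0,2,3,5,7,8,10]),("dorian",[0,2,3,5,7,9,10]),
   ("phrygian",[0,1,3,5,7,8,10]),("mixolydian",[0,2,4,5,7,9,10]),("pentatonic",[0,2,4,7,9]),
   ("minor_pent",[0,3,5,7,10]),("blues",[0,3,5,6,7,10]),("harmonic_minor",[0,2,3,5,7,8,11])]

-- ===== PORT A =====
-- the first three lines of A:
-- _SCALE_INTERVALS.get(scale_type.lower().replace(" ", "_"), _SCALE_INTERVALS["major"])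
def pvIntervalsOf (scale_type : String) : List Int :=
  pvScaleIntervals.getD (PySem.Str.replace (PySem.Str.lower scale_type) " " "_")
    (pvScaleIntervals.getD "major" [])   -- "major" is present, so the [] fallback is never the value
def pvRootOf (key : String) : Int := pvSemitoneMap.getD key 0
def pvValidPcs (root : Int) (intervals : List Int) : PySem.Set Int :=
  PySem.Set.ofList (intervals.map (fun iv => PySem.Int.mod (root + iv) 12))

def pvDeltas : List Int := [1, -1, 2, -2, 3, -3, 4, -4, 5, -5, 6]

def pvLoopA (valid : PySem.Set Int) (pitch : Int) : List Int → Int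
  | [] => pitch   -- loop falls through: "return pitch  # Shouldn't happen"
  | d :: ds =>
      let candidate := pitch + d
      if PySem.Set.contains valid (PySem.Int.mod candidate 12) then max 0 (min 127 candidate)
      else pvLoopA valid pitch ds

def snap_to_scale (pitch : Int) (key : String) (scale_type : String) : Int :=
  let intervals := pvIntervalsOf scale_type
  let root_pc := pvRootOf key
  let valid_pcs := pvValidPcs root_pc intervals
  if PySem.Set.contains valid_pcs (PySem.Int.mod pitch 12) then pitch
  else pvLoopA valid_pcs pitch pvDeltas

-- ===== PORT B =====
-- B's 'mask |= 1 << ((root + iv) % 12)' accumulation; (…)%12 is nonnegative, so .toNat is exact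
def pvMaskOf (root : Int) (intervals : List Int) : Nat :=
  intervals.foldl (fun m iv => m ||| (1 <<< (PySem.Int.mod (root + iv) 12).toNat)) 0

-- B's truthiness test '(mask >> x) & 1'; x = (…)%12 is nonnegative, so .toNat is exact
def pvBitTest (mask : Nat) (x : Int) : Bool := ((mask >>> x.toNat) &&& 1) != 0

-- B's 'while not (mask >> ((p ± k) % 12)) & 1: k += 1'; a fuel of 12 covers every pitch
-- class, and the mask always has a set bit, so the fuel-exhausted branch is never taken
def pvWalk (mask : Nat) (p : Int) (step : Int) : Nat → Int → Int
  | 0, k => k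
  | fuel + 1, k =>
      if pvBitTest mask (PySem.Int.mod (p + step * k) 12) then k
      else pvWalk mask p step fuel (k + 1)

def pvDeltaB (mask : Nat) (p : Int) : Int :=
  let up := pvWalk mask p 1 12 1
  let down := pvWalk mask p (-1) 12 1
  if up ≤ down then up else -down

def snap_to_scale_alt (pitch : Int) (key : String) (scale_type : String) : Int :=
  let intervals := pvScaleIntervals.getD (PySem.Str.replace (PySem.Str.lower scale_type) " " "_")
    (pvScaleIntervals.getD "major" [])
  let root := pvSemitoneMap.getD key 0
  let mask := pvMaskOf root intervals
  let p := PySem.Int.mod pitch 12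
  if pvBitTest mask p then pitch
  else max 0 (min 127 (pitch + pvDeltaB mask p))

-- ===== PRECONDITION & SPEC =====
def Spec_snap_to_scale (pitch : Int) (key : String) (scale_type : String) (out : Int) : Prop := out = snap_to_scale_alt pitch key scale_type
instance (pitch : Int) (key : String) (scale_type : String) (out : Int) : Decidable (Spec_snap_to_scale pitch key scale_type out) := by unfold Spec_snap_to_scale; infer_instance

-- ===== CLAIM (what is proved, stated in full; the proofs are below) =====
def Claim_equal_snap_to_scale : Prop := ∀ (pitch : Int) (key : String) (scale_type : String), Dom_snap_to_scale pitch key scale_type → Spec_snap_to_scale pitch key scale_type (snap_to_scale pitch key scale_type)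

-- ===== LEMMAS AND PROOFS =====
def pvRoots : List Int := [0,1,2,3,4,5,6,7,8,9,10,11]
def pvScaleLists : List (List Int) :=
  [[0,2,4,5,7,9,11],[0,2,3,5,7,8,10],[0,2,3,5,7,9,10],[0,1,3,5,7,8,10],[0,2,4,5,7,9,10],
   [0,2,4,7,9],[0,3,5,7,10],[0,3,5,6,7,10],[0,2,3,5,7,8,11]]

-- the first hitting delta of A's probe loop, as a function of the pitch class only
def pvFirstA (valid : PySem.Set Int) (p : Int) : List Int → Option Int
  | [] => none
  | d :: ds =>
      if PySem.Set.contains valid (PySem.Int.mod (p + d) 12) then some d else pvFirstA valid p ds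

lemma pv_mod_shift (a d : Int) :
    PySem.Int.mod (a + d) 12 = PySem.Int.mod (PySem.Int.mod a 12 + d) 12 := by
  rw [PySem.Int.mod_eq_emod_of_pos (by norm_num), PySem.Int.mod_eq_emod_of_pos (by norm_num),
      PySem.Int.mod_eq_emod_of_pos (by norm_num)]
  omega

lemma pvLoopA_eq (valid : PySem.Set Int) (pitch : Int) (ds : List Int) :
    pvLoopA valid pitch ds =
      match pvFirstA valid (PySem.Int.mod pitch 12) ds with
      | some d => max 0 (min 127 (pitch + d))
      | none => pitch := by
  induction ds with
  | nil => rfl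
  | cons d ds ih =>
      simp only [pvLoopA, pvFirstA]
      rw [pv_mod_shift pitch d]
      by_cases h : PySem.Set.contains valid (PySem.Int.mod (PySem.Int.mod pitch 12 + d) 12) = true
      · rw [if_pos h, if_pos h]
      · rw [if_neg h, if_neg h, ih]

lemma pv_getD_mem {κ ν : Type} [BEq κ] (d : PySem.Dict κ ν) (k : κ) (v0 : ν) :
    d.getD k v0 = v0 ∨ d.getD k v0 ∈ d.items.map Prod.snd := by
  rw [PySem.Dict.getD_eq_get?_getD]
  cases h : d.get? k with
  | none => left; rfl
  | some v =>
      right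
      unfold PySem.Dict.get? at h
      cases hf : List.find? (fun p => p.1 == k) d.items with
      | none => rw [hf] at h; simp at h
      | some pr =>
          rw [hf] at h; simp at h
          subst h
          exact List.mem_map.mpr ⟨pr, List.mem_of_find?_eq_some hf, rfl⟩

lemma pv_root_mem (key : String) : pvRootOf key ∈ pvRoots := by
  rcases pv_getD_mem pvSemitoneMap key 0 with h | h
  · rw [pvRootOf, h]; decide
  · exact (by decide : ∀ x ∈ pvSemitoneMap.items.map Prod.snd, x ∈ pvRoots) _ h

lemma pv_intervals_mem (s : String) : pvIntervalsOf s ∈ pvScaleLists := by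
  rcases pv_getD_mem pvScaleIntervals (PySem.Str.replace (PySem.Str.lower s) " " "_")
      (pvScaleIntervals.getD "major" []) with h | h
  · rw [pvIntervalsOf, h]; decide
  · exact (by decide : ∀ x ∈ pvScaleIntervals.items.map Prod.snd, x ∈ pvScaleLists) _ h

def pvCheck (root : Int) (ivl : List Int) (p : Int) : Bool :=
  (PySem.Set.contains (pvValidPcs root ivl) p == pvBitTest (pvMaskOf root ivl) p) &&
  (PySem.Set.contains (pvValidPcs root ivl) p ||
    (pvFirstA (pvValidPcs root ivl) p pvDeltas == some (pvDeltaB (pvMaskOf root ivl) p)))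

lemma pv_all_check : ∀ root ∈ pvRoots, ∀ ivl ∈ pvScaleLists, ∀ pn ∈ List.range 12,
    pvCheck root ivl ((pn : Nat) : Int) = true := by decide

lemma pv_mod_bounds (a : Int) : 0 ≤ PySem.Int.mod a 12 ∧ PySem.Int.mod a 12 < 12 := by
  rw [PySem.Int.mod_eq_emod_of_pos (by norm_num)]
  omega

-- ===== VERDICT (by name: the statement is the Claim_ definition above) =====
theorem snap_to_scale_spec : Claim_equal_snap_to_scale := by
  intro pitch key scale_type _
  unfold Spec_snap_to_scale snap_to_scale snap_to_scale_alt
  show (let intervals := pvIntervalsOf scale_type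
        let root_pc := pvRootOf key
        let valid_pcs := pvValidPcs root_pc intervals
        if PySem.Set.contains valid_pcs (PySem.Int.mod pitch 12) then pitch
        else pvLoopA valid_pcs pitch pvDeltas) =
       (let mask := pvMaskOf (pvRootOf key) (pvIntervalsOf scale_type)
        let p := PySem.Int.mod pitch 12
        if pvBitTest mask p then pitch
        else max 0 (min 127 (pitch + pvDeltaB mask p)))
  simp only []
  set R := pvRootOf key with hR
  set I := pvIntervalsOf scale_type with hI
  set valid := pvValidPcs R I with hv
  set mask := pvMaskOf R I with hm
  set p := PySem.Int.mod pitch 12 with hp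
  have hch : pvCheck R I p = true := by
    obtain ⟨h0, h1⟩ := pv_mod_bounds pitch
    have hpn : p = ((p.toNat : Nat) : Int) := by omega
    rw [hpn]
    exact pv_all_check R (pv_root_mem key) I (pv_intervals_mem scale_type) p.toNat
      (List.mem_range.mpr (by omega))
  unfold pvCheck at hch
  rw [← hv, ← hm] at hch
  rw [Bool.and_eq_true, beq_iff_eq, Bool.or_eq_true] at hch
  obtain ⟨hbit, hrest⟩ := hch
  by_cases hc : PySem.Set.contains valid p = true
  · rw [if_pos hc, if_pos (hbit ▸ hc)]
  · have hcf : PySem.Set.contains valid p = false := by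
      revert hc; cases PySem.Set.contains valid p <;> simp
    have hbf : pvBitTest mask p = false := hbit ▸ hcf
    rw [if_neg hc, if_neg (by rw [hbf]; simp)]
    rw [pvLoopA_eq, ← hp]
    rcases hrest with h | h
    · rw [hcf] at h; cases h
    · rw [beq_iff_eq] at h
      rw [h]
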